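-- pv_equiv track=rewrite | github.com/AdamZhouSE/pythonHomework | Code/CodeRecords/2837/60797/289122.py | find
-- ===== SOURCE A (Python) =====
-- def find(n, left, right):
--     re1 = n - left+1
--     for i in range(left-1):
--         re1 += pow(2,i+1)
--     re2 = 1
--     index = 1
--     for i in range(right-2):
--         re2 += pow(2,i+1)
--         index += 1
--     remain = n - right+1
--     for j in range(remain):
--         re2 += pow(2,index)
--     return [re1,re2]
-- ===== SOURCE B (Python) =====
-- def find(n, left, right):
--     re1 = n - left + 1
--     if left >= 2:
--         re1 += 2 ** left - 2
--     index = max(right - 1, 1)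
--     re2 = (2 ** index - 1) if right >= 2 else 1
--     re2 += max(n - right + 1, 0) * 2 ** index
--     return [re1, re2]
-- ===== Notes on version B (the rewrite author's own statement) =====
-- stated objective: faster
-- what changed: Replaced the three accumulation loops over ranges by closed-form geometric-series formulas (2^left-2, 2^(right-1)-1) and a single multiplication for the repeated constant addend.
import Mathlib
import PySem

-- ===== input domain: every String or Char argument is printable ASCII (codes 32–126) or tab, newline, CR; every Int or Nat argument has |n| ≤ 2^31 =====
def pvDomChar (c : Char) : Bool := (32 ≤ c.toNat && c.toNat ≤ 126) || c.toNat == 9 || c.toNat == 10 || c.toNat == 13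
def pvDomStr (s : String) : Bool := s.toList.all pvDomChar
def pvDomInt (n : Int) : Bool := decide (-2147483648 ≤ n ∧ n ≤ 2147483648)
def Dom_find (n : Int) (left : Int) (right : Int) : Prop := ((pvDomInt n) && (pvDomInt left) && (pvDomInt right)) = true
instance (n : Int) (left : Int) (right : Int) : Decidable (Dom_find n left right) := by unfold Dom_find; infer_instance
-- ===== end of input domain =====

-- B replaces A's three summation loops by closed-form geometric-series formulas (objective: faster).

-- ===== PORT A =====
-- exponents i+1 and index are always ≥ 1, so .toNat is exact here (never a negative exponent)
def find (n : Int) (left : Int) (right : Int) : List Int :=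
  let re1 : Int := (PySem.List.pyRange 0 (left - 1) 1).foldl
    (fun acc i => acc + 2 ^ (i + 1).toNat) (n - left + 1)
  let p : Int × Int := (PySem.List.pyRange 0 (right - 2) 1).foldl
    (fun p i => (p.1 + 2 ^ (i + 1).toNat, p.2 + 1)) (1, 1)
  let remain : Int := n - right + 1
  let re2 : Int := (PySem.List.pyRange 0 remain 1).foldl
    (fun acc _ => acc + 2 ^ p.2.toNat) p.1
  [re1, re2]

-- ===== PORT B =====
def find_alt (n : Int) (left : Int) (right : Int) : List Int :=
  let re1 : Int := if 2 ≤ left then n - left + 1 + (2 ^ left.toNat - 2) else n - left + 1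
  let index : Int := max (right - 1) 1
  let re2 : Int := (if 2 ≤ right then 2 ^ index.toNat - 1 else 1)
                   + max (n - right + 1) 0 * 2 ^ index.toNat
  [re1, re2]

-- ===== PRECONDITION & SPEC =====
def Spec_find (n : Int) (left : Int) (right : Int) (out : List Int) : Prop := out = find_alt n left right
instance (n : Int) (left : Int) (right : Int) (out : List Int) : Decidable (Spec_find n left right out) := by unfold Spec_find; infer_instance

-- ===== CLAIM (what is proved, stated in full; the proofs are below) =====
def Claim_equal_find : Prop := ∀ (n : Int) (left : Int) (right : Int), Dom_find n left right → Spec_find n left right (find n left right)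

-- ===== LEMMAS AND PROOFS =====

-- A's first loop (shape produced by pyRange_one): summing 2^(j+1), j = 0 .. m-1, gives 2^(m+1) - 2
theorem pvFoldlPow (m : Nat) (init : Int) :
    List.foldl (fun acc i => acc + 2 ^ (i + 1).toNat) init
      ((List.range m).map (fun (k : Nat) => (0 : Int) + (k : Int)))
      = init + 2 ^ (m + 1) - 2 := by
  induction m generalizing init with
  | zero => simp
  | succ k ih =>
      rw [List.range_succ, List.map_append, List.foldl_append, ih]
      have h : ((0 : Int) + (k : Int) + 1).toNat = k + 1 := by omega
      simp only [List.map_cons, List.map_nil, List.foldl_cons, List.foldl_nil, h, pow_succ]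
      ring

-- A's second loop: the (re2, index) pair after m iterations
theorem pvFoldlPair (m : Nat) :
    List.foldl (fun (p : Int × Int) i => (p.1 + 2 ^ (i + 1).toNat, p.2 + 1))
      ((1 : Int), (1 : Int)) ((List.range m).map (fun (k : Nat) => (0 : Int) + (k : Int)))
      = (2 ^ (m + 1) - 1, 1 + (m : Int)) := by
  induction m with
  | zero => simp
  | succ k ih =>
      rw [List.range_succ, List.map_append, List.foldl_append, ih]
      have h : ((0 : Int) + (k : Int) + 1).toNat = k + 1 := by omega
      simp only [List.map_cons, List.map_nil, List.foldl_cons, List.foldl_nil, h, pow_succ,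
        Prod.mk.injEq]
      constructor
      · ring
      · push_cast; ring

-- A's third loop: adding a constant c once per iteration of range(m)
theorem pvFoldlConst (m : Nat) (init c : Int) :
    List.foldl (fun acc _ => acc + c) init
      ((List.range m).map (fun (k : Nat) => (0 : Int) + (k : Int)))
      = init + (m : Int) * c := by
  induction m generalizing init with
  | zero => simp
  | succ k ih =>
      rw [List.range_succ, List.map_append, List.foldl_append, ih]
      simp only [List.map_cons, List.map_nil, List.foldl_cons, List.foldl_nil]
      push_cast; ring

-- ===== VERDICT (by name: the statement is the Claim_ definition above) =====
theorem find_spec : Claim_equal_find := by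
  intro n left right _
  unfold Spec_find find find_alt
  simp only [PySem.List.pyRange_one, sub_zero, pvFoldlPow, pvFoldlPair, pvFoldlConst]
  have hre1 : n - left + 1 + 2 ^ ((left - 1).toNat + 1) - 2
      = if 2 ≤ left then n - left + 1 + (2 ^ left.toNat - 2) else n - left + 1 := by
    split_ifs with h
    · have : (left - 1).toNat + 1 = left.toNat := by omega
      rw [this]; ring
    · have : (left - 1).toNat = 0 := by omega
      rw [this]; norm_num
  have hidx : ((1 : Int) + ((right - 2).toNat : Int)).toNat = (max (right - 1) 1).toNat := by
    omega
  have hre2b : (2 : Int) ^ ((right - 2).toNat + 1) - 1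
      = if 2 ≤ right then 2 ^ (max (right - 1) 1).toNat - 1 else 1 := by
    split_ifs with h
    · have : (right - 2).toNat + 1 = (max (right - 1) 1).toNat := by omega
      rw [this]
    · have : (right - 2).toNat = 0 := by omega
      rw [this]; norm_num
  have hrem : ((n - right + 1).toNat : Int) = max (n - right + 1) 0 := by omega
  rw [hre1, hidx, hrem, hre2b]
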